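-- pv_equiv track=rewrite | github.com/ACNH-app/acnh-diary | app/domain/catalog.py | order_categories
-- ===== SOURCE A (Python) =====
-- FURNITURE_CATEGORY_ORDER = [
--     "Housewares",
--     "Miscellaneous",
--     "Wall-mounted",
--     "Ceiling decor",
-- ]
--
-- RECIPE_CATEGORY_ORDER = [
--     "Tools",
--     "Housewares",
--     "Miscellaneous",
--     "Wall-mounted",
--     "Ceiling Decor",
--     "Interior",
--     "Equipment",
--     "Other",
--     "Savory",
--     "Sweet",
-- ]
--
-- RECIPE_FACET_ORDER = [
--     "season:young_spring_bamboo",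
--     "season:cherry_blossom",
--     "season:summer_shell",
--     "season:mushroom",
--     "season:maple_leaf",
--     "season:tree_bounty",
--     "season:winter_snowflake",
--     "season:christmas_ornament",
--     "event:bunny_day",
--     "event:festivale",
--     "event:wedding_season",
--     "event:halloween",
--     "event:turkey_day",
--     "npc:celeste",
--     "npc:pascal",
--     "ingredient:fruit",
--     "ingredient:flower",
--     "ingredient:shell_non_mermaid",
--     "ingredient:vine_moss",
-- ]
--
-- SPECIAL_SOURCE_ORDER = [
--     "gulliver",
--     "gullivarr",
--     "flick_bug_off",
--     "flick",
--     "cj_fishing_tourney",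
--     "cj",
--     "recycle_box",
--     "mom",
--     "birthday",
--     "jingle",
--     "festivale",
--     "wedding_season",
--     "pascal",
--     "halloween",
--     "turkey_day",
--     "fireworks",
--     "other",
-- ]
--
-- CLOTHING_CATEGORY_ORDER = [
--     "Tops",
--     "Bottoms",
--     "Dress-Up",
--     "Headwear",
--     "Accessories",
--     "Socks",
--     "Shoes",
--     "Bags",
--     "Umbrellas",
-- ]
--
-- def order_categories(catalog_type: str, categories: list[str]) -> list[str]:
--     if catalog_type == "furniture":
--         preferred = FURNITURE_CATEGORY_ORDER
--     elif catalog_type == "clothing":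
--         preferred = CLOTHING_CATEGORY_ORDER
--     elif catalog_type == "recipes":
--         preferred = [*RECIPE_CATEGORY_ORDER, *RECIPE_FACET_ORDER]
--     elif catalog_type == "special_items":
--         preferred = SPECIAL_SOURCE_ORDER
--     else:
--         return sorted(categories)
--
--     rank = {name: i for i, name in enumerate(preferred)}
--     return sorted(categories, key=lambda c: (rank.get(c, len(preferred)), c.casefold()))
-- ===== SOURCE B (Python) =====
-- FURNITURE_CATEGORY_ORDER = [
--     "Housewares",
--     "Miscellaneous",
--     "Wall-mounted",
--     "Ceiling decor",
-- ]
--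
-- RECIPE_CATEGORY_ORDER = [
--     "Tools",
--     "Housewares",
--     "Miscellaneous",
--     "Wall-mounted",
--     "Ceiling Decor",
--     "Interior",
--     "Equipment",
--     "Other",
--     "Savory",
--     "Sweet",
-- ]
--
-- RECIPE_FACET_ORDER = [
--     "season:young_spring_bamboo",
--     "season:cherry_blossom",
--     "season:summer_shell",
--     "season:mushroom",
--     "season:maple_leaf",
--     "season:tree_bounty",
--     "season:winter_snowflake",
--     "season:christmas_ornament",
--     "event:bunny_day",
--     "event:festivale",
--     "event:wedding_season",
--     "event:halloween",
--     "event:turkey_day",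
--     "npc:celeste",
--     "npc:pascal",
--     "ingredient:fruit",
--     "ingredient:flower",
--     "ingredient:shell_non_mermaid",
--     "ingredient:vine_moss",
-- ]
--
-- SPECIAL_SOURCE_ORDER = [
--     "gulliver",
--     "gullivarr",
--     "flick_bug_off",
--     "flick",
--     "cj_fishing_tourney",
--     "cj",
--     "recycle_box",
--     "mom",
--     "birthday",
--     "jingle",
--     "festivale",
--     "wedding_season",
--     "pascal",
--     "halloween",
--     "turkey_day",
--     "fireworks",
--     "other",
-- ]
--
-- CLOTHING_CATEGORY_ORDER = [
--     "Tops",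
--     "Bottoms",
--     "Dress-Up",
--     "Headwear",
--     "Accessories",
--     "Socks",
--     "Shoes",
--     "Bags",
--     "Umbrellas",
-- ]
--
-- _PREFERRED_ORDERS = {
--     "furniture": FURNITURE_CATEGORY_ORDER,
--     "clothing": CLOTHING_CATEGORY_ORDER,
--     "recipes": RECIPE_CATEGORY_ORDER + RECIPE_FACET_ORDER,
--     "special_items": SPECIAL_SOURCE_ORDER,
-- }
--
-- def order_categories(catalog_type: str, categories: list[str]) -> list[str]:
--     preferred = _PREFERRED_ORDERS.get(catalog_type)
--     if preferred is None:
--         return sorted(categories)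
--     result = []
--     for name in preferred:
--         result.extend(c for c in categories if c == name)
--     known = set(preferred)
--     rest = sorted((c for c in categories if c not in known), key=str.casefold)
--     return result + rest
-- ===== Notes on version B (the rewrite author's own statement) =====
-- stated objective: alternative
-- what changed: Replaces the single composite-key comparison sort (rank dict + sorted with a (rank, casefold) tuple key) by an index-driven bucketing pass over the preferred list (emitting matching categories per preferred name, duplicates preserved) followed by a smaller stable casefold sort of only the non-preferred remainder; the unknown-type branch stays plain sorted().
import Mathlib
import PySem

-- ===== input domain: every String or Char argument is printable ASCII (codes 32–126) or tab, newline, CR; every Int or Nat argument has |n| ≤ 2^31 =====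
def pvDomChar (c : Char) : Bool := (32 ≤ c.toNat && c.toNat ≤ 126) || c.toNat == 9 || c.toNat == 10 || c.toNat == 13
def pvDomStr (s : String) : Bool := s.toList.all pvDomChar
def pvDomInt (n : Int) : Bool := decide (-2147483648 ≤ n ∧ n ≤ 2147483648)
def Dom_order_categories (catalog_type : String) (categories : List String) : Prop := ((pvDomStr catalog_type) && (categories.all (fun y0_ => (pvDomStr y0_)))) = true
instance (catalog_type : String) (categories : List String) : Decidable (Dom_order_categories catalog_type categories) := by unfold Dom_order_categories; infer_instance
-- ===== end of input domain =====

-- B replaces A's one composite-key sort by a bucketing pass over the preferred list plus a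
-- stable casefold sort of the non-preferred remainder (objective: alternative decomposition).

-- module constants (shared by both ports)
def FURNITURE_CATEGORY_ORDER : List String :=
  ["Housewares", "Miscellaneous", "Wall-mounted", "Ceiling decor"]

def RECIPE_CATEGORY_ORDER : List String :=
  ["Tools", "Housewares", "Miscellaneous", "Wall-mounted", "Ceiling Decor",
   "Interior", "Equipment", "Other", "Savory", "Sweet"]

def RECIPE_FACET_ORDER : List String :=
  ["season:young_spring_bamboo", "season:cherry_blossom", "season:summer_shell",
   "season:mushroom", "season:maple_leaf", "season:tree_bounty",
   "season:winter_snowflake", "season:christmas_ornament", "event:bunny_day",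
   "event:festivale", "event:wedding_season", "event:halloween", "event:turkey_day",
   "npc:celeste", "npc:pascal", "ingredient:fruit", "ingredient:flower",
   "ingredient:shell_non_mermaid", "ingredient:vine_moss"]

def SPECIAL_SOURCE_ORDER : List String :=
  ["gulliver", "gullivarr", "flick_bug_off", "flick", "cj_fishing_tourney", "cj",
   "recycle_box", "mom", "birthday", "jingle", "festivale", "wedding_season",
   "pascal", "halloween", "turkey_day", "fireworks", "other"]

def CLOTHING_CATEGORY_ORDER : List String :=
  ["Tops", "Bottoms", "Dress-Up", "Headwear", "Accessories", "Socks", "Shoes",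
   "Bags", "Umbrellas"]

-- ===== PORT A =====
-- c.casefold() is ported as PySem.Str.lower (exact on the printable-ASCII domain Dom_).
def order_categories (catalog_type : String) (categories : List String) : List String :=
  let preferred? : Option (List String) :=
    if catalog_type == "furniture" then some FURNITURE_CATEGORY_ORDER
    else if catalog_type == "clothing" then some CLOTHING_CATEGORY_ORDER
    else if catalog_type == "recipes" then some (RECIPE_CATEGORY_ORDER ++ RECIPE_FACET_ORDER)
    else if catalog_type == "special_items" then some SPECIAL_SOURCE_ORDER
    else none
  match preferred? with
  | none => PySem.List.sorted categories (fun c => c)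
  | some preferred =>
    let rank : PySem.Dict String Int :=
      (PySem.List.enumerate preferred).foldl (fun d p => d.insert p.2 p.1) PySem.Dict.empty
    PySem.List.sorted2 categories
      (fun c => rank.getD c (PySem.List.len preferred))
      (fun c => PySem.Str.lower c)

-- ===== PORT B =====
def pvPreferredOrders : PySem.Dict String (List String) :=
  PySem.Dict.ofList
    [("furniture", FURNITURE_CATEGORY_ORDER),
     ("clothing", CLOTHING_CATEGORY_ORDER),
     ("recipes", RECIPE_CATEGORY_ORDER ++ RECIPE_FACET_ORDER),
     ("special_items", SPECIAL_SOURCE_ORDER)]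

-- str.casefold is ported as PySem.Str.lower (exact on the printable-ASCII domain Dom_).
def order_categories_alt (catalog_type : String) (categories : List String) : List String :=
  match pvPreferredOrders.get? catalog_type with
  | none => PySem.List.sorted categories (fun c => c)
  | some preferred =>
    let result : List String :=
      preferred.foldl (fun acc name => acc ++ categories.filter (fun c => c == name)) []
    let known : PySem.Set String := PySem.Set.ofList preferred
    let rest : List String :=
      PySem.List.sorted (categories.filter (fun c => !(known.contains c)))
        (fun c => PySem.Str.lower c)
    result ++ rest

-- ===== PRECONDITION & SPEC =====
def Spec_order_categories (catalog_type : String) (categories : List String) (out : List String) : Prop := out = order_categories_alt catalog_type categories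
instance (catalog_type : String) (categories : List String) (out : List String) : Decidable (Spec_order_categories catalog_type categories out) := by unfold Spec_order_categories; infer_instance

-- ===== CLAIM (what is proved, stated in full; the proofs are below) =====
def Claim_equal_order_categories : Prop := ∀ (catalog_type : String) (categories : List String), Dom_order_categories catalog_type categories → Spec_order_categories catalog_type categories (order_categories catalog_type categories)

-- ===== LEMMAS AND PROOFS =====

def pvBefore (P : List String) (a b : String) : Bool :=
  decide ((List.idxOf a P : Int) < (List.idxOf b P : Int)) ||
  (!decide ((List.idxOf b P : Int) < (List.idxOf a P : Int)) && decide (PySem.Str.lower a < PySem.Str.lower b))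

theorem pvBefore_false_of_lt (P : List String) (x y : String) (h : List.idxOf y P < List.idxOf x P) :
    pvBefore P x y = false := by
  simp only [pvBefore, Bool.or_eq_false_iff, Bool.and_eq_false_iff, decide_eq_false_iff_not,
    Bool.not_eq_false', decide_eq_true_eq, not_lt]
  exact ⟨by exact_mod_cast h.le, Or.inl (by exact_mod_cast h)⟩

theorem pvBefore_self (P : List String) (x : String) : pvBefore P x x = false := by
  simp [pvBefore]

theorem pvBefore_true_of_lt (P : List String) (x y : String) (h : List.idxOf x P < List.idxOf y P) :
    pvBefore P x y = true := by
  simp only [pvBefore, Bool.or_eq_true, decide_eq_true_eq]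
  left; exact_mod_cast h

theorem pvBefore_eq_of_eq (P : List String) (x y : String) (h : List.idxOf x P = List.idxOf y P) :
    pvBefore P x y = decide (PySem.Str.lower x < PySem.Str.lower y) := by
  simp [pvBefore, h]

theorem pv_insertBy_append_right {α : Type} (before : α → α → Bool) (x : α) (l1 l2 : List α)
    (h1 : ∀ y ∈ l1, before x y = false) :
    PySem.List.insertBy before x (l1 ++ l2) = l1 ++ PySem.List.insertBy before x l2 := by
  induction l1 with
  | nil => simp
  | cons y t ih =>
    simp only [List.cons_append, PySem.List.insertBy, h1 y (by simp)]
    simp [ih (fun z hz => h1 z (by simp [hz]))]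

theorem pv_insertBy_all_true {α : Type} (before : α → α → Bool) (x : α) (l : List α)
    (h : ∀ y ∈ l, before x y = true) :
    PySem.List.insertBy before x l = x :: l := by
  cases l with
  | nil => rfl
  | cons y t => simp [PySem.List.insertBy, h y (by simp)]

theorem pv_insertBy_congr {α : Type} (before before' : α → α → Bool) (x : α) (l : List α)
    (h : ∀ y ∈ l, before x y = before' x y) :
    PySem.List.insertBy before x l = PySem.List.insertBy before' x l := by
  induction l with
  | nil => rfl
  | cons y t ih =>
    simp only [PySem.List.insertBy, h y (by simp)]
    rw [ih (fun z hz => h z (by simp [hz]))]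

theorem pv_sorted2_step (P : List String) (cs : List String) (x : String) :
    PySem.List.sorted2 (cs ++ [x]) (fun c => (List.idxOf c P : Int)) (fun c => PySem.Str.lower c)
    = PySem.List.insertBy (pvBefore P) x
        (PySem.List.sorted2 cs (fun c => (List.idxOf c P : Int)) (fun c => PySem.Str.lower c)) := by
  show List.foldl (fun acc y => PySem.List.insertBy (pvBefore P) y acc) [] (cs ++ [x])
    = PySem.List.insertBy (pvBefore P) x
        (List.foldl (fun acc y => PySem.List.insertBy (pvBefore P) y acc) [] cs)
  rw [List.foldl_append]
  rfl

theorem pv_sorted_step (cs : List String) (x : String) :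
    PySem.List.sorted (cs ++ [x]) (fun c => PySem.Str.lower c)
    = PySem.List.insertBy (fun a b => decide (PySem.Str.lower a < PySem.Str.lower b)) x
        (PySem.List.sorted cs (fun c => PySem.Str.lower c)) := by
  simp [PySem.List.sorted, List.foldl_append]

theorem pv_main (P : List String) (hnd : P.Nodup) (cs : List String) :
    PySem.List.sorted2 cs (fun c => (List.idxOf c P : Int)) (fun c => PySem.Str.lower c)
      = P.flatMap (fun name => cs.filter (fun c => c == name))
        ++ PySem.List.sorted (cs.filter (fun c => !(P.contains c)))
            (fun c => PySem.Str.lower c) := by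
  induction cs using List.reverseRecOn with
  | nil => simp [PySem.List.sorted2, PySem.List.sorted]
  | append_singleton cs x ih =>
    rw [pv_sorted2_step, ih]
    by_cases hx : x ∈ P
    · -- x is a preferred name: it is appended at the end of its bucket
      obtain ⟨P1, P2, rfl⟩ := List.append_of_mem hx
      rw [List.nodup_append] at hnd
      have hx1 : x ∉ P1 := fun h => hnd.2.2 x h x (by simp) rfl
      have hx2 : x ∉ P2 := (List.nodup_cons.mp hnd.2.1).1
      have hyP1 : ∀ y ∈ P2, y ∉ P1 := fun y hy h => hnd.2.2 y h y (by simp [hy]) rfl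
      have hkx : List.idxOf x (P1 ++ x :: P2) = P1.length := by
        rw [List.idxOf_append_of_notMem hx1]; simp
      -- rewrite the flatMaps and filters on the RHS
      have hmid : (cs ++ [x]).filter (fun c => c == x) = cs.filter (fun c => c == x) ++ [x] := by
        simp [List.filter_append]
      have hflat1 : P1.flatMap (fun name => (cs ++ [x]).filter (fun c => c == name))
          = P1.flatMap (fun name => cs.filter (fun c => c == name)) := by
        apply List.flatMap_congr
        intro name hname
        have hne : (x == name) = false := by
          simp only [beq_eq_false_iff_ne]; rintro rfl; exact hx1 hname
        simp [List.filter_append, hne]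
      have hflat2 : P2.flatMap (fun name => (cs ++ [x]).filter (fun c => c == name))
          = P2.flatMap (fun name => cs.filter (fun c => c == name)) := by
        apply List.flatMap_congr
        intro name hname
        have hne : (x == name) = false := by
          simp only [beq_eq_false_iff_ne]; rintro rfl; exact hx2 hname
        simp [List.filter_append, hne]
      have hrest : (cs ++ [x]).filter (fun c => !((P1 ++ x :: P2).contains c))
          = cs.filter (fun c => !((P1 ++ x :: P2).contains c)) := by
        simp [List.filter_append]
      rw [List.flatMap_append, List.flatMap_cons, List.flatMap_append, List.flatMap_cons,
        hmid, hflat1, hflat2, hrest]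
      -- insert x after the P1-buckets and its own bucket, before everything later
      simp only [List.append_assoc]
      rw [pv_insertBy_append_right]
      · rw [pv_insertBy_append_right]
        · rw [pv_insertBy_all_true]
          · simp
          · intro y hy
            rcases List.mem_append.mp hy with hy2 | hyrest
            · obtain ⟨name, hname, hyf⟩ := List.mem_flatMap.mp hy2
              have hyeq : y = name := by simpa using (List.mem_filter.mp hyf).2
              subst hyeq
              apply pvBefore_true_of_lt
              rw [hkx, List.idxOf_append_of_notMem (hyP1 y hname), List.idxOf_cons]
              have hne : (x == y) = false := by
                simp only [beq_eq_false_iff_ne]; rintro rfl; exact hx2 hname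
              simp only [hne, cond_false]
              omega
            · have hyf := (PySem.List.mem_sorted _ _ _ _).mp hyrest
              have hyn : y ∉ (P1 ++ x :: P2) := by
                have := (List.mem_filter.mp hyf).2
                simpa using this
              apply pvBefore_true_of_lt
              rw [hkx, List.idxOf_eq_length hyn]
              simp only [List.length_append, List.length_cons]
              omega
        · intro y hy
          have hyeq : y = x := by simpa using (List.mem_filter.mp hy).2
          subst hyeq
          exact pvBefore_self _ _
      · intro y hy
        obtain ⟨name, hname, hyf⟩ := List.mem_flatMap.mp hy
        have hyeq : y = name := by simpa using (List.mem_filter.mp hyf).2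
        subst hyeq
        apply pvBefore_false_of_lt
        rw [hkx, List.idxOf_append_of_mem hname]
        exact List.idxOf_lt_length_of_mem hname
    · -- x is not preferred: it is inserted into the casefold-sorted remainder
      have hcont : (List.contains P x) = false := by simpa using hx
      have hflat : P.flatMap (fun name => (cs ++ [x]).filter (fun c => c == name))
          = P.flatMap (fun name => cs.filter (fun c => c == name)) := by
        apply List.flatMap_congr
        intro name hname
        have hne : (x == name) = false := by
          simp only [beq_eq_false_iff_ne]; rintro rfl; exact hx hname
        simp [List.filter_append, hne]
      have hrest : (cs ++ [x]).filter (fun c => !(P.contains c))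
          = cs.filter (fun c => !(P.contains c)) ++ [x] := by
        simp [List.filter_append, hx]
      rw [hflat, hrest, pv_sorted_step]
      rw [pv_insertBy_append_right]
      · congr 1
        apply pv_insertBy_congr
        intro y hy
        have hyf := (PySem.List.mem_sorted _ _ _ _).mp hy
        have hyn : y ∉ P := by simpa using (List.mem_filter.mp hyf).2
        exact pvBefore_eq_of_eq P x y (by rw [List.idxOf_eq_length hx, List.idxOf_eq_length hyn])
      · intro y hy
        obtain ⟨name, hname, hyf⟩ := List.mem_flatMap.mp hy
        have hyeq : y = name := by simpa using (List.mem_filter.mp hyf).2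
        subst hyeq
        apply pvBefore_false_of_lt
        rw [List.idxOf_eq_length hx]
        exact List.idxOf_lt_length_of_mem hname

theorem pv_set_contains (P : List String) (c : String) :
    (PySem.Set.ofList P).contains c = P.contains c := by
  simp [PySem.Set.contains]

theorem pv_rank_get (P : List String) (hnd : P.Nodup) (d0 : PySem.Dict String Int)
    (s : Int) (c : String) :
    ((PySem.List.enumerate P s).foldl (fun d p => d.insert p.2 p.1) d0).get? c
      = if c ∈ P then some (s + (List.idxOf c P : Int)) else d0.get? c := by
  induction P generalizing d0 s with
  | nil => simp [PySem.List.enumerate]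
  | cons p t ih =>
    simp only [PySem.List.enumerate, List.foldl_cons]
    rw [ih (List.nodup_cons.mp hnd).2]
    by_cases hc : c = p
    · subst hc
      have hct : c ∉ t := (List.nodup_cons.mp hnd).1
      simp [hct, PySem.Dict.get?_insert_self]
    · by_cases hmem : c ∈ t
      · simp [hmem, hc, Ne.symm hc]
        ring
      · simp [hmem, hc, PySem.Dict.get?_insert_of_ne _ _ hc]

theorem pv_rank_getD (P : List String) (hnd : P.Nodup) (c : String) :
    (((PySem.List.enumerate P).foldl (fun d p => d.insert p.2 p.1) PySem.Dict.empty).getD c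
        (PySem.List.len P)) = (List.idxOf c P : Int) := by
  rw [PySem.Dict.getD, pv_rank_get P hnd _ 0 c]
  by_cases hc : c ∈ P
  · simp [hc]
  · simp [hc, PySem.Dict.empty, PySem.Dict.get?, PySem.List.len]

theorem pv_branch (P : List String) (hnd : P.Nodup) (cs : List String)
    (hmain : PySem.List.sorted2 cs (fun c => (List.idxOf c P : Int)) (fun c => PySem.Str.lower c)
      = P.flatMap (fun name => cs.filter (fun c => c == name))
        ++ PySem.List.sorted (cs.filter (fun c => !(P.contains c)))
            (fun c => PySem.Str.lower c)) :
    PySem.List.sorted2 cs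
        (fun c => (((PySem.List.enumerate P).foldl (fun d p => d.insert p.2 p.1)
            PySem.Dict.empty).getD c (PySem.List.len P)))
        (fun c => PySem.Str.lower c)
      = P.foldl (fun acc name => acc ++ cs.filter (fun c => c == name)) []
        ++ PySem.List.sorted (cs.filter (fun c => !((PySem.Set.ofList P).contains c)))
            (fun c => PySem.Str.lower c) := by
  have hk : (fun c => (((PySem.List.enumerate P).foldl (fun d p => d.insert p.2 p.1)
      PySem.Dict.empty).getD c (PySem.List.len P))) = fun c => (List.idxOf c P : Int) := by
    funext c; exact pv_rank_getD P hnd c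
  rw [hk, PySem.List.foldl_append_eq_flatMap, List.nil_append]
  have hf : cs.filter (fun c => !((PySem.Set.ofList P).contains c))
      = cs.filter (fun c => !(P.contains c)) := by
    apply List.filter_congr
    intro c _
    rw [pv_set_contains]
  rw [hf, hmain]

-- A's branch body equals B's branch body, for any duplicate-free preferred list
theorem pv_both (P : List String) (hnd : P.Nodup) (cs : List String) :
    PySem.List.sorted2 cs
        (fun c => (((PySem.List.enumerate P).foldl (fun d p => d.insert p.2 p.1)
            PySem.Dict.empty).getD c (PySem.List.len P)))
        (fun c => PySem.Str.lower c)
      = P.foldl (fun acc name => acc ++ cs.filter (fun c => c == name)) []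
        ++ PySem.List.sorted (cs.filter (fun c => !((PySem.Set.ofList P).contains c)))
            (fun c => PySem.Str.lower c) :=
  pv_branch P hnd cs (pv_main P hnd cs)

-- ===== VERDICT (by name: the statement is the Claim_ definition above) =====
theorem order_categories_spec : Claim_equal_order_categories := by
  intro catalog_type categories _
  unfold Spec_order_categories order_categories order_categories_alt
  by_cases h1 : catalog_type = "furniture"
  · subst h1
    have hget : pvPreferredOrders.get? "furniture" = some FURNITURE_CATEGORY_ORDER := by decide
    simp only [hget, beq_self_eq_true, if_true]
    exact pv_both FURNITURE_CATEGORY_ORDER (by decide) categories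
  by_cases h2 : catalog_type = "clothing"
  · subst h2
    have hget : pvPreferredOrders.get? "clothing" = some CLOTHING_CATEGORY_ORDER := by decide
    have e1 : (("clothing" : String) == "furniture") = false := by decide
    simp only [hget, e1, Bool.false_eq_true, if_false, beq_self_eq_true, if_true]
    exact pv_both CLOTHING_CATEGORY_ORDER (by decide) categories
  by_cases h3 : catalog_type = "recipes"
  · subst h3
    have hget : pvPreferredOrders.get? "recipes"
        = some (RECIPE_CATEGORY_ORDER ++ RECIPE_FACET_ORDER) := by decide
    have e1 : (("recipes" : String) == "furniture") = false := by decide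
    have e2 : (("recipes" : String) == "clothing") = false := by decide
    simp only [hget, e1, e2, Bool.false_eq_true, if_false, beq_self_eq_true, if_true]
    exact pv_both (RECIPE_CATEGORY_ORDER ++ RECIPE_FACET_ORDER) (by decide) categories
  by_cases h4 : catalog_type = "special_items"
  · subst h4
    have hget : pvPreferredOrders.get? "special_items" = some SPECIAL_SOURCE_ORDER := by decide
    have e1 : (("special_items" : String) == "furniture") = false := by decide
    have e2 : (("special_items" : String) == "clothing") = false := by decide
    have e3 : (("special_items" : String) == "recipes") = false := by decide
    simp only [hget, e1, e2, e3, Bool.false_eq_true, if_false, beq_self_eq_true, if_true]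
    exact pv_both SPECIAL_SOURCE_ORDER (by decide) categories
  -- unknown catalog type: both sides are plain sorted(categories)
  have hb1 : (catalog_type == "furniture") = false := by simp [h1]
  have hb2 : (catalog_type == "clothing") = false := by simp [h2]
  have hb3 : (catalog_type == "recipes") = false := by simp [h3]
  have hb4 : (catalog_type == "special_items") = false := by simp [h4]
  have hget : pvPreferredOrders.get? catalog_type = none := by
    have hof : pvPreferredOrders = PySem.Dict.mk
        [("furniture", FURNITURE_CATEGORY_ORDER),
         ("clothing", CLOTHING_CATEGORY_ORDER),
         ("recipes", RECIPE_CATEGORY_ORDER ++ RECIPE_FACET_ORDER),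
         ("special_items", SPECIAL_SOURCE_ORDER)] := by decide
    rw [hof]
    simp [PySem.Dict.get?,
      show (("furniture" : String) == catalog_type) = false by simp [Ne.symm h1],
      show (("clothing" : String) == catalog_type) = false by simp [Ne.symm h2],
      show (("recipes" : String) == catalog_type) = false by simp [Ne.symm h3],
      show (("special_items" : String) == catalog_type) = false by simp [Ne.symm h4]]
  simp only [hb1, hb2, hb3, hb4, Bool.false_eq_true, if_false, hget]
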